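-- pv_equiv track=rewrite | github.com/lisavader/terpene_classification | run_hmmscan.py | _find_error
-- ===== SOURCE A (Python) =====
-- def _find_error(output: list[str]) -> str:
--     """ Returns the most descriptive line in error output from hmmscan """
--     # is there a line that explicitly starts with the error logging?
--     for i, line in enumerate(output):
--         if line.startswith("Error:"):
--             if i + 1 < len(output):
--                 return f"{line.strip()} {output[i + 1].strip()}"
--             return line.strip()
--     # if not, take the first non-empty line
--     for line in output:
--         line = line.strip()
--         if line:
--             return line
--     # in the worst case, return a default
--     return "unknown error"
-- ===== SOURCE B (Python) =====
-- def _find_error(output: list[str]) -> str: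
--     """ Returns the most descriptive line in error output from hmmscan """
--     # one pass: remember first "Error:" index and first non-empty stripped line
--     err_i = None
--     first_nonempty = None
--     for i, line in enumerate(output):
--         if err_i is None and line.startswith("Error:"):
--             err_i = i
--         if first_nonempty is None:
--             s = line.strip()
--             if s:
--                 first_nonempty = s
--     if err_i is not None:
--         s = output[err_i].strip()
--         if err_i + 1 < len(output):
--             return f"{s} {output[err_i + 1].strip()}"
--         return s
--     if first_nonempty is not None:
--         return first_nonempty
--     return "unknown error"
-- ===== Notes on version B (the rewrite author's own statement) =====
-- stated objective: alternative
-- what changed: Replaces A's two sequential scans with early returns by a single fold over the list that accumulates the first 'Error:' index and the first non-empty stripped line, followed by one post-processing step.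
import Mathlib
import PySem

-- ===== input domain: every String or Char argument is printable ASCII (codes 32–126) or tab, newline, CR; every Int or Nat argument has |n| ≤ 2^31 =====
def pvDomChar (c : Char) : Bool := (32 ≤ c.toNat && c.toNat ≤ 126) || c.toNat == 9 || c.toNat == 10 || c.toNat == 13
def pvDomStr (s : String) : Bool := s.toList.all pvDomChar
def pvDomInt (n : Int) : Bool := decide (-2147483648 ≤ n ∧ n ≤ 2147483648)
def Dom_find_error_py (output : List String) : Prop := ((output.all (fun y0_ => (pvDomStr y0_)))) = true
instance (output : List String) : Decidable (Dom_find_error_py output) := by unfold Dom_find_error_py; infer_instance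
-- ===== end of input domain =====

-- B replaces A's two sequential early-return scans by a single fold accumulating the first
-- "Error:" index and the first non-empty stripped line (objective: alternative decomposition).


-- ===== PORT A =====
-- first loop: for i, line in enumerate(output): if line.startswith("Error:"): return …
def loopA1 (output : List String) (i : Nat) : List String → Option String
  | [] => none
  | line :: rest =>
      if PySem.Str.startswith line "Error:" then
        some (if i + 1 < output.length then
                PySem.Str.strip line ++ " " ++
                  PySem.Str.strip ((PySem.List.pyGet? output ((i : Int) + 1)).getD "")
              else PySem.Str.strip line)
      else loopA1 output (i + 1) rest

-- second loop: first non-empty stripped line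
def loopA2 : List String → Option String
  | [] => none
  | line :: rest =>
      let l := PySem.Str.strip line
      if l ≠ "" then some l else loopA2 rest

def find_error_py (output : List String) : String :=
  match loopA1 output 0 output with
  | some s => s
  | none =>
    match loopA2 output with
    | some s => s
    | none => "unknown error"

-- ===== PORT B =====
-- single fold: state = (current index, first "Error:" index, first non-empty stripped line)
def stepB (st : Nat × Option Nat × Option String) (line : String) :
    Nat × Option Nat × Option String :=
  let (i, ei, fn) := st
  let ei' := match ei with
    | some _ => ei
    | none => if PySem.Str.startswith line "Error:" then some i else none
  let fn' := match fn with
    | some _ => fn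
    | none =>
      let s := PySem.Str.strip line
      if s ≠ "" then some s else none
  (i + 1, ei', fn')

def find_error_py_alt (output : List String) : String :=
  let st := output.foldl stepB (0, none, none)
  match st.2.1 with
  | some i =>
      let s := PySem.Str.strip ((PySem.List.pyGet? output (i : Int)).getD "")
      if i + 1 < output.length then
        s ++ " " ++ PySem.Str.strip ((PySem.List.pyGet? output ((i : Int) + 1)).getD "")
      else s
  | none =>
    match st.2.2 with
    | some s => s
    | none => "unknown error"

-- ===== PRECONDITION & SPEC =====
def Spec_find_error_py (output : List String) (out : String) : Prop := out = find_error_py_alt output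
instance (output : List String) (out : String) : Decidable (Spec_find_error_py output out) := by unfold Spec_find_error_py; infer_instance

-- ===== CLAIM (what is proved, stated in full; the proofs are below) =====
def Claim_equal_find_error_py : Prop := ∀ (output : List String), Dom_find_error_py output → Spec_find_error_py output (find_error_py output)

-- ===== LEMMAS AND PROOFS =====

-- spec of the error component: index of the first line starting with "Error:"
def fErr (i : Nat) : List String → Option Nat
  | [] => none
  | line :: rest =>
      if PySem.Str.startswith line "Error:" then some i else fErr (i + 1) rest

theorem foldB_char (l : List String) : ∀ (i : Nat) (e : Option Nat) (f : Option String),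
    l.foldl stepB (i, e, f) =
      (i + l.length, e.orElse (fun _ => fErr i l), f.orElse (fun _ => loopA2 l)) := by
  induction l with
  | nil => intro i e f; simp [fErr, loopA2]
  | cons x xs ih =>
    intro i e f
    simp only [List.foldl_cons, stepB, ih, fErr, loopA2, List.length_cons]
    cases e <;> cases f <;> split_ifs <;> simp [Option.orElse] <;> omega

theorem loopA1_char (output : List String) : ∀ (rest : List String) (i : Nat),
    rest = output.drop i →
    loopA1 output i rest =
      (fErr i rest).map (fun j =>
        if j + 1 < output.length then
          PySem.Str.strip ((PySem.List.pyGet? output (j : Int)).getD "") ++ " " ++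
            PySem.Str.strip ((PySem.List.pyGet? output ((j : Int) + 1)).getD "")
        else PySem.Str.strip ((PySem.List.pyGet? output (j : Int)).getD "")) := by
  intro rest
  induction rest with
  | nil => intro i _; simp [loopA1, fErr]
  | cons line rest ih =>
    intro i h
    have hget : output[i]? = some line := by
      rw [← List.head?_drop, ← h]; rfl
    by_cases hs : PySem.Str.startswith line "Error:"
    · simp only [loopA1, fErr, hs, if_true, Option.map_some]
      have : PySem.List.pyGet? output (i : Int) = some line := by
        rw [PySem.List.pyGet?_natCast, hget]
      rw [this]
      rfl
    · have hdrop : rest = output.drop (i + 1) := by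
        rw [← List.drop_drop, ← h]; rfl
      simp only [loopA1, fErr, hs]
      exact ih (i + 1) hdrop

theorem find_error_py_eq (output : List String) :
    find_error_py output = find_error_py_alt output := by
  unfold find_error_py find_error_py_alt
  rw [foldB_char output 0 none none]
  rw [loopA1_char output output 0 (by simp)]
  cases hE : fErr 0 output with
  | none => simp
  | some j => simp

-- ===== VERDICT (by name: the statement is the Claim_ definition above) =====
theorem find_error_py_spec : Claim_equal_find_error_py := by
  intro output _
  unfold Spec_find_error_py
  exact find_error_py_eq output
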